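-- pv_equiv track=rewrite | github.com/prOgsa/Computer_algorithms | lab_04/one_approc.py | find_interval
-- ===== SOURCE A (Python) =====
-- def find_interval(data, ind):
--     min_x = data[0][ind]
--     max_x = data[0][ind]
--     for line in data:
--         if line[ind] < min_x:
--             min_x = line[ind]
--         if line[ind] > max_x:
--             max_x = line[ind]
--     return min_x, max_x
-- ===== SOURCE B (Python) =====
-- def find_interval(data, ind):
--     col = [row[ind] for row in data]
--     return min(col), max(col)
-- ===== Notes on version B (the rewrite author's own statement) =====
-- stated objective: idiomatic
-- what changed: Replaces the fused manual min/max loop with building the column once and two builtin reduction passes min(col), max(col).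
import Mathlib
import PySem

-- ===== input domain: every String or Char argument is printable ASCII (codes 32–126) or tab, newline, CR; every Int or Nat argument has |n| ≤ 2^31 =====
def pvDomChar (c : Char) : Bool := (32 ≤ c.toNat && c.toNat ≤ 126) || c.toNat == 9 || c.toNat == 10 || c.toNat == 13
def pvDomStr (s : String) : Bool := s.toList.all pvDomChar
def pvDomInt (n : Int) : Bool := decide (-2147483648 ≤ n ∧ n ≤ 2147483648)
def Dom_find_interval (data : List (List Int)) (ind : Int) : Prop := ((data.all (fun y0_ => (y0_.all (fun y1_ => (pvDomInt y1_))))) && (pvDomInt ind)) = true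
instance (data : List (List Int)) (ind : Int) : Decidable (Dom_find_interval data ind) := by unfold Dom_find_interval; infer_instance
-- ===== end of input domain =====

-- B builds the column once and uses two builtin reductions (min, max) instead of A's fused manual loop.

-- ===== PORT A =====
def find_interval (data : List (List Int)) (ind : Int) : Int × Int :=
  let m0 := PySem.List.pyGetD (PySem.List.pyGetD data 0 []) ind 0
  data.foldl (fun s line =>
    let v := PySem.List.pyGetD line ind 0
    (if v < s.1 then v else s.1, if v > s.2 then v else s.2)) (m0, m0)

-- ===== PORT B =====
def find_interval_alt (data : List (List Int)) (ind : Int) : Int × Int :=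
  let col := data.map (fun row => PySem.List.pyGetD row ind 0)
  ((PySem.List.min? col (fun x => x)).getD 0, (PySem.List.max? col (fun x => x)).getD 0)

-- ===== PRECONDITION & SPEC =====
-- Pre_ excludes exactly the inputs on which A raises IndexError: empty data, or ind out of Python range for some row.
def Pre_find_interval (data : List (List Int)) (ind : Int) : Prop :=
  data ≠ [] ∧ ∀ row ∈ data, PySem.Raise.InRange row.length ind
instance (data : List (List Int)) (ind : Int) : Decidable (Pre_find_interval data ind) := by unfold Pre_find_interval; infer_instance
def pvWitness_find_interval : List (List Int) × Int := ([[3, 1], [2, 5], [4, 4]], 1)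
def Spec_find_interval (data : List (List Int)) (ind : Int) (out : Int × Int) : Prop := out = find_interval_alt data ind
instance (data : List (List Int)) (ind : Int) (out : Int × Int) : Decidable (Spec_find_interval data ind out) := by unfold Spec_find_interval; infer_instance

-- ===== CLAIM =====
def Claim_equal_find_interval : Prop := ∀ (data : List (List Int)) (ind : Int), Dom_find_interval data ind → Pre_find_interval data ind → Spec_find_interval data ind (find_interval data ind)

-- ===== LEMMAS AND PROOFS =====
theorem fold_pair (g : List Int → Int) :
    ∀ (xs : List (List Int)) (a b : Int),
      xs.foldl (fun s line =>
        ((if g line < s.1 then g line else s.1 : Int), (if g line > s.2 then g line else s.2 : Int))) (a, b)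
      = ((xs.map g).foldl min a, (xs.map g).foldl max b) := by
  intro xs
  induction xs with
  | nil => intro a b; simp
  | cons x t ih =>
    intro a b
    simp only [List.foldl_cons, List.map_cons]
    rw [ih]
    congr 1 <;> congr 1 <;> simp [min_def, max_def] <;> omega

theorem find_interval_spec : Claim_equal_find_interval := by
  intro data ind _ hpre
  obtain ⟨hne, hin⟩ := hpre
  unfold Spec_find_interval find_interval find_interval_alt
  cases data with
  | nil => exact absurd rfl hne
  | cons d0 rest =>
    simp only [PySem.List.pyGetD_zero_cons, List.map_cons, List.foldl_cons]
    set g : List Int → Int := fun row => PySem.List.pyGetD row ind 0 with hg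
    have h0 : (if g d0 < g d0 then g d0 else g d0, if g d0 > g d0 then g d0 else g d0)
        = (g d0, g d0) := by simp
    rw [show (fun (s : Int × Int) line =>
        ((if PySem.List.pyGetD line ind 0 < s.1 then PySem.List.pyGetD line ind 0 else s.1 : Int),
         (if PySem.List.pyGetD line ind 0 > s.2 then PySem.List.pyGetD line ind 0 else s.2 : Int)))
      = (fun (s : Int × Int) line =>
        ((if g line < s.1 then g line else s.1 : Int), (if g line > s.2 then g line else s.2 : Int))) from rfl]
    rw [h0, fold_pair g]
    rw [PySem.List.min?_id_cons, PySem.List.max?_id_cons]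
    rfl
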